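-- pv_equiv track=rewrite | github.com/chenyuhang55555/Python | Test/test.py | permutationSentence
-- ===== SOURCE A (Python) =====
-- def permutationSentence(s):
--     wBag=s.split(" ")
--     if len(wBag)==1:
--         return wBag
--     else:
--         res = []
--         for i in range(len(wBag)):
--             w = wBag[i]
--             wBag_ = wBag[0:i] + wBag[i + 1:]
--             tmp = permutationSentence(" ".join(wBag_))
--             res += [w+" "+x for x in tmp]
--         return res
-- ===== SOURCE B (Python) =====
-- def permutationSentence(s):
--     words = s.split(" ")
--     level = [([], words)]
--     for _ in range(len(words)):
--         nxt = []
--         for prefix, rem in level: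
--             for i in range(len(rem)):
--                 nxt.append((prefix + [rem[i]], rem[:i] + rem[i + 1:]))
--         level = nxt
--     return [" ".join(prefix) for prefix, _ in level]
-- ===== Notes on version B (the rewrite author's own statement) =====
-- stated objective: alternative
-- what changed: A enumerates sentence permutations by recursion on the string, re-joining and re-splitting the remaining words at every level; B splits once and iteratively expands a breadth-first level of (prefix, remaining-words) pairs, joining each permutation once at the end.
import Mathlib
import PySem

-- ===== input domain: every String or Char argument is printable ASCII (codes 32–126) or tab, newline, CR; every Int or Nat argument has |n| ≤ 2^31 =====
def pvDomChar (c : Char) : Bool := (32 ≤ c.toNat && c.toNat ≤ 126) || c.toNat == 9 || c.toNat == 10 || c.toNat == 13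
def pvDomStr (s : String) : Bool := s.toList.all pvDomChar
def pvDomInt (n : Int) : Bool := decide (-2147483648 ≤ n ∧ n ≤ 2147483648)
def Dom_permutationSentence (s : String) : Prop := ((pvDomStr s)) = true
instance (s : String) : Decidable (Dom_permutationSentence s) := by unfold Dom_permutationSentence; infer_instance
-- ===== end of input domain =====

-- B replaces A's string-level recursion (which re-joins and re-splits the sentence at every
-- level) by an iterative breadth-first expansion of (prefix, remaining-words) pairs, joining
-- each complete permutation once at the end; objective: alternative.

-- ===== PORT A =====
-- The lemmas up to the definition of `permutationSentence` are cited by its termination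
-- proof (the recursive call is on " ".join of a word list one shorter than s.split(" ")).

theorem pvSplitOnGo_eq (c : Char) : ∀ (fuel : Nat) (l cur : List Char) (acc : List (List Char)), l.length ≤ fuel →
    PySem.Chars.splitOn.go [c] fuel l cur acc =
      acc.reverse ++ (List.splitOnP (· == c) l).modifyHead (cur.reverse ++ ·) := by
  intro fuel
  induction fuel with
  | zero =>
    intro l cur acc h
    have : l = [] := by simpa using h
    subst this
    simp [PySem.Chars.splitOn.go, List.splitOnP_nil]
  | succ n ih =>
    intro l cur acc h
    cases l with
    | nil => simp [PySem.Chars.splitOn.go, List.splitOnP_nil]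
    | cons a rest =>
      by_cases hc : a = c
      · subst hc
        have hpre : [a].isPrefixOf (a :: rest) = true := by simp [List.isPrefixOf]
        rw [PySem.Chars.splitOn.go]
        simp only [hpre, if_true]
        rw [ih _ _ _ (by simpa using h)]
        have hid : (fun x : List Char => [].reverse ++ x) = id := by funext x; simp
        simp only [List.splitOnP_cons, beq_self_eq_true, if_true, hid, List.length_cons, List.drop_succ_cons, List.reverse_cons, List.append_assoc, List.modifyHead_cons, id]
        cases hsp : List.splitOnP (fun x => x == a) rest <;> simp [hsp]
      · have hpre : [c].isPrefixOf (a :: rest) = false := by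
          simp [List.isPrefixOf]
          exact fun hh => absurd hh.symm hc
        rw [PySem.Chars.splitOn.go]
        simp only [hpre, Bool.false_eq_true, if_false]
        rw [ih _ _ _ (by simpa using Nat.le_of_succ_le_succ h)]
        rw [List.splitOnP_cons]
        simp only [beq_iff_eq, hc, if_false]
        rw [List.modifyHead_modifyHead]
        congr 1
        congr 1
        funext x
        simp

theorem pvSplitOn_eq (c : Char) (s : List Char) :
    PySem.Chars.splitOn s [c] = List.splitOn c s := by
  unfold PySem.Chars.splitOn
  rw [pvSplitOnGo_eq c (s.length + 1) s [] [] (by omega)]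
  simp only [List.reverse_nil, List.nil_append, List.splitOn]
  cases hsp : List.splitOnP (fun x => x == c) s with
  | nil => simp
  | cons h t => simp

theorem pvMem_splitOnP (c : Char) : ∀ (s x : List Char), x ∈ List.splitOnP (· == c) s → c ∉ x := by
  intro s
  induction s with
  | nil => intro x hx; simp [List.splitOnP_nil] at hx; simp [hx]
  | cons a rest ih =>
    intro x hx
    rw [List.splitOnP_cons] at hx
    by_cases hc : a = c
    · subst hc
      simp at hx
      rcases hx with h | h
      · simp [h]
      · exact ih x h
    · simp [beq_iff_eq, hc] at hx
      cases hsp : List.splitOnP (fun x => x == c) rest with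
      | nil => exact absurd hsp (List.splitOnP_ne_nil _ _)
      | cons hd tl =>
        rw [hsp] at hx
        simp [List.modifyHead_cons] at hx
        rcases hx with h | h
        · subst h
          intro hmem
          rcases List.mem_cons.mp hmem with h | h
          · exact hc h.symm
          · exact ih hd (by rw [hsp]; exact List.mem_cons_self) h
        · exact ih x (by rw [hsp]; exact List.mem_cons_of_mem _ h)

def pvSplit (s : String) : List String := (PySem.Str.split? s " ").getD []

theorem pvStrSplit_eq (s : String) :
    PySem.Str.split? s " " = some ((List.splitOn ' ' s.toList).map String.ofList) := by
  unfold PySem.Str.split? PySem.Chars.split?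
  simp [pvSplitOn_eq]

theorem pvSplit_eq (s : String) : pvSplit s = (List.splitOn ' ' s.toList).map String.ofList := by
  unfold pvSplit; rw [pvStrSplit_eq]; rfl

theorem pvSplit_ne_nil (s : String) : pvSplit s ≠ [] := by
  rw [pvSplit_eq]
  simp [List.splitOn]
  exact List.splitOnP_ne_nil _ _

theorem pvSplit_words (s : String) : ∀ w ∈ pvSplit s, ' ' ∉ w.toList := by
  rw [pvSplit_eq]
  intro w hw
  simp at hw
  rcases hw with ⟨x, hx, rfl⟩
  have hnc := pvMem_splitOnP ' ' s.toList x hx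
  simpa using hnc

theorem pvSplit_join (l : List String) (h : ∀ w ∈ l, ' ' ∉ w.toList) (hne : l ≠ []) :
    PySem.Str.split? (PySem.Str.join " " l) " " = some l := by
  rw [pvStrSplit_eq]
  congr 1
  have ht : (PySem.Str.join " " l).toList = [' '].intercalate (l.map String.toList) := by
    rw [PySem.Str.toList_join]; rfl
  rw [ht, List.splitOn_intercalate (l.map String.toList) ' '
      (by intro x hx; simp at hx; rcases hx with ⟨w, hw, rfl⟩; exact h w hw)
      (by simpa using hne)]
  simp [Function.comp_def]

theorem pvSplit_join_len (l : List String) (h : ∀ w ∈ l, ' ' ∉ w.toList) (hne : l ≠ []) :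
    (pvSplit (PySem.Str.join " " l)).length = l.length := by
  unfold pvSplit; rw [pvSplit_join l h hne]; rfl

theorem pvSlice_eraseIdx (W : List String) (i : Int) (h0 : 0 ≤ i) :
    PySem.List.slice W (some 0) (some i) ++ PySem.List.slice W (some (i + 1)) none
      = W.eraseIdx i.toNat := by
  rw [show PySem.List.slice W (some 0) (some i) = PySem.List.slice W none (some i) from rfl,
    PySem.List.slice_to W h0, PySem.List.slice_from W (by omega : (0:Int) ≤ i + 1),
    List.eraseIdx_eq_take_drop_succ]
  have h1 : (i + 1).toNat = i.toNat + 1 := by omega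
  rw [h1]

def permutationSentence (s : String) : List String :=
  let wBag := (PySem.Str.split? s " ").getD []
  if _h : wBag.length = 1 then wBag
  else
    (PySem.List.pyRange 0 (wBag.length : Int) 1).attach.foldl
      (fun res t =>
        let i := t.1
        let w := PySem.List.pyGetD wBag i ""
        let wBag_ := PySem.List.slice wBag (some 0) (some i) ++ PySem.List.slice wBag (some (i + 1)) none
        let tmp := permutationSentence (PySem.Str.join " " wBag_)
        res ++ tmp.map (fun x => w ++ " " ++ x))
      []
  termination_by (pvSplit s).length
  decreasing_by
    have hi := PySem.List.mem_pyRange_one.mp t.2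
    rw [pvSlice_eraseIdx _ _ hi.1]
    have hi2 : t.1 < ((pvSplit s).length : Int) := hi.2
    have hlen : (pvSplit s).length ≠ 1 := _h
    have hnn : (pvSplit s) ≠ [] := pvSplit_ne_nil s
    have h2 : 2 ≤ (pvSplit s).length := by
      cases hl : (pvSplit s).length with
      | zero => exact absurd (List.length_eq_zero_iff.mp hl) hnn
      | succ n => cases n with
        | zero => exact absurd hl hlen
        | succ m => omega
    have hilt : (t.1).toNat < (pvSplit s).length := by omega
    have herase_len : ((pvSplit s).eraseIdx (t.1).toNat).length = (pvSplit s).length - 1 := by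
      rw [List.length_eraseIdx]; simp [hilt]
    have hw : ∀ w ∈ (pvSplit s).eraseIdx (t.1).toNat, ' ' ∉ w.toList :=
      fun w hwm => pvSplit_words s w (List.mem_of_mem_eraseIdx hwm)
    have hne : (pvSplit s).eraseIdx (t.1).toNat ≠ [] := by
      intro hnil
      rw [hnil] at herase_len
      simp at herase_len
      omega
    show (pvSplit (PySem.Str.join " " ((pvSplit s).eraseIdx (t.1).toNat))).length < (pvSplit s).length
    rw [pvSplit_join_len _ hw hne, herase_len]
    omega

-- ===== PORT B =====
def permutationSentence_alt (s : String) : List String :=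
  let words := (PySem.Str.split? s " ").getD []
  let level : List (List String × List String) := [([], words)]
  let final :=
    (PySem.List.pyRange 0 (words.length : Int) 1).foldl
      (fun level _ =>
        level.foldl
          (fun nxt pr =>
            (PySem.List.pyRange 0 (pr.2.length : Int) 1).foldl
              (fun nxt i =>
                nxt ++ [(pr.1 ++ [PySem.List.pyGetD pr.2 i ""],
                         PySem.List.slice pr.2 (some 0) (some i) ++
                           PySem.List.slice pr.2 (some (i + 1)) none)])
              nxt)
          [])
      level
  final.map (fun pr => PySem.Str.join " " pr.1)


-- ===== PRECONDITION & SPEC =====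
def Spec_permutationSentence (s : String) (out : List String) : Prop := out = permutationSentence_alt s
instance (s : String) (out : List String) : Decidable (Spec_permutationSentence s out) := by unfold Spec_permutationSentence; infer_instance

-- ===== CLAIM (what is proved, stated in full; the proofs are below) =====
def Claim_equal_permutationSentence : Prop := ∀ (s : String), Dom_permutationSentence s → Spec_permutationSentence s (permutationSentence s)

-- ===== LEMMAS AND PROOFS =====
def pvPermsAux : Nat → List String → List (List String)
  | 0, _ => [[]]
  | n + 1, l =>
    (List.range l.length).flatMap
      (fun i => (pvPermsAux n (l.eraseIdx i)).map (fun p => l.getD i "" :: p))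

def pvPerms (l : List String) : List (List String) := pvPermsAux l.length l

def pvExpand (pr : List String × List String) : List (List String × List String) :=
  (List.range pr.2.length).map (fun k => (pr.1 ++ [pr.2.getD k ""], pr.2.eraseIdx k))

def pvStep (lv : List (List String × List String)) : List (List String × List String) :=
  lv.flatMap pvExpand

theorem pv_inner_eq (pr : List String × List String) (nxt : List (List String × List String)) :
    (PySem.List.pyRange 0 (pr.2.length : Int) 1).foldl
      (fun nxt i => nxt ++ [(pr.1 ++ [PySem.List.pyGetD pr.2 i ""],
        PySem.List.slice pr.2 (some 0) (some i) ++ PySem.List.slice pr.2 (some (i + 1)) none)]) nxt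
      = nxt ++ pvExpand pr := by
  rw [PySem.List.pyRange_zero_natCast, List.foldl_map, PySem.List.foldl_append_singleton_eq_map]
  unfold pvExpand
  congr 1
  apply List.map_congr_left
  intro k hk
  rw [PySem.List.pyGetD_natCast, pvSlice_eraseIdx _ _ (by positivity)]
  congr 1

theorem pv_step_eq (lv : List (List String × List String)) :
    lv.foldl
      (fun nxt pr =>
        (PySem.List.pyRange 0 (pr.2.length : Int) 1).foldl
          (fun nxt i => nxt ++ [(pr.1 ++ [PySem.List.pyGetD pr.2 i ""],
            PySem.List.slice pr.2 (some 0) (some i) ++ PySem.List.slice pr.2 (some (i + 1)) none)])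
          nxt)
      [] = pvStep lv := by
  have h : ∀ (acc : List (List String × List String)),
      lv.foldl
        (fun nxt pr =>
          (PySem.List.pyRange 0 (pr.2.length : Int) 1).foldl
            (fun nxt i => nxt ++ [(pr.1 ++ [PySem.List.pyGetD pr.2 i ""],
              PySem.List.slice pr.2 (some 0) (some i) ++ PySem.List.slice pr.2 (some (i + 1)) none)])
            nxt)
        acc = acc ++ lv.flatMap pvExpand := by
    induction lv with
    | nil => intro acc; simp
    | cons pr t ih =>
      intro acc
      rw [List.foldl_cons, pv_inner_eq, ih, List.flatMap_cons, List.append_assoc]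
  rw [h []]; rfl

theorem pv_foldl_const {α β : Type} (l : List α) (f : β → β) (acc : β) :
    l.foldl (fun a _ => f a) acc = f^[l.length] acc := by
  induction l generalizing acc with
  | nil => rfl
  | cons x t ih => rw [List.foldl_cons, ih, List.length_cons, Function.iterate_succ_apply]

theorem pv_iter_flatMap : ∀ (k : Nat) (lv : List (List String × List String)),
    pvStep^[k] lv = lv.flatMap (fun e => pvStep^[k] [e]) := by
  intro k
  induction k with
  | zero => intro lv; simp
  | succ n ih =>
    intro lv
    rw [Function.iterate_succ_apply]
    calc pvStep^[n] (pvStep lv)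
        = (lv.flatMap pvExpand).flatMap (fun e => pvStep^[n] [e]) := by
          rw [show pvStep lv = lv.flatMap pvExpand from rfl, ih]
      _ = lv.flatMap (fun e => (pvExpand e).flatMap (fun e' => pvStep^[n] [e'])) :=
          List.flatMap_assoc
      _ = lv.flatMap (fun e => pvStep^[n + 1] [e]) := by
          congr 1
          funext e
          rw [Function.iterate_succ_apply,
            show pvStep [e] = pvExpand e from by simp [pvStep], ih]

theorem pv_iter_perms : ∀ (k : Nat) (pr rem : List String), rem.length = k →
    pvStep^[k] [(pr, rem)] = (pvPermsAux k rem).map (fun p => (pr ++ p, ([] : List String))) := by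
  intro k
  induction k with
  | zero =>
    intro pr rem h
    rw [List.length_eq_zero_iff] at h
    subst h
    simp [pvPermsAux]
  | succ n ih =>
    intro pr rem h
    rw [Function.iterate_succ_apply]
    rw [show pvStep [(pr, rem)] = pvExpand (pr, rem) from by simp [pvStep]]
    unfold pvExpand
    rw [pv_iter_flatMap n, List.flatMap_map]
    rw [show pvPermsAux (n + 1) rem = (List.range rem.length).flatMap
        (fun i => (pvPermsAux n (rem.eraseIdx i)).map (fun p => rem.getD i "" :: p)) from rfl]
    rw [List.map_flatMap]
    apply List.flatMap_congr
    intro k hk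
    rw [List.mem_range] at hk
    rw [ih (pr ++ [rem.getD k ""]) (rem.eraseIdx k)
        (by rw [List.length_eraseIdx, if_pos hk]; omega)]
    rw [List.map_map]
    apply List.map_congr_left
    intro p hp
    simp [List.append_assoc]

theorem pvB_eq (s : String) :
    permutationSentence_alt s = (pvPerms (pvSplit s)).map (PySem.Str.join " ") := by
  unfold permutationSentence_alt
  have hb : (fun (level : List (List String × List String)) (_ : Int) =>
      level.foldl
        (fun nxt pr =>
          (PySem.List.pyRange 0 (pr.2.length : Int) 1).foldl
            (fun nxt i =>
              nxt ++ [(pr.1 ++ [PySem.List.pyGetD pr.2 i ""],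
                       PySem.List.slice pr.2 (some 0) (some i) ++
                         PySem.List.slice pr.2 (some (i + 1)) none)])
            nxt)
        []) = fun level _ => pvStep level := by
    funext lv i
    exact pv_step_eq lv
  rw [hb]
  show List.map (fun pr => PySem.Str.join " " pr.1)
      (List.foldl (fun level (_ : Int) => pvStep level) [([], (PySem.Str.split? s " ").getD [])]
        (PySem.List.pyRange 0 (((PySem.Str.split? s " ").getD []).length : Int) 1))
      = List.map (PySem.Str.join " ") (pvPerms (pvSplit s))
  rw [pv_foldl_const]
  have hlen : (PySem.List.pyRange 0 (((PySem.Str.split? s " ").getD []).length : Int) 1).length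
      = ((PySem.Str.split? s " ").getD []).length := by
    rw [PySem.List.pyRange_zero_natCast]
    simp
  rw [hlen]
  rw [pv_iter_perms _ [] _ rfl]
  rw [List.map_map]
  show List.map ((fun pr => PySem.Str.join " " pr.1) ∘ fun p => ([] ++ p, []))
      (pvPermsAux (pvSplit s).length (pvSplit s)) = _
  unfold pvPerms
  apply List.map_congr_left
  intro p hp
  simp

theorem pv_perms_length : ∀ (n : Nat) (l : List String), l.length = n →
    ∀ p ∈ pvPermsAux n l, p.length = n := by
  intro n
  induction n with
  | zero => intro l _ p hp; simp [pvPermsAux] at hp; simp [hp]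
  | succ m ih =>
    intro l hl p hp
    unfold pvPermsAux at hp
    simp only [List.mem_flatMap, List.mem_map, List.mem_range] at hp
    obtain ⟨i, hi, q, hq, rfl⟩ := hp
    have he : (l.eraseIdx i).length = m := by
      rw [List.length_eraseIdx, if_pos hi]; omega
    simp [ih (l.eraseIdx i) he q hq]

theorem pv_join_cons (w : String) (p : List String) (hp : p ≠ []) :
    w ++ " " ++ PySem.Str.join " " p = PySem.Str.join " " (w :: p) := by
  apply String.toList_inj.mp
  cases p with
  | nil => exact absurd rfl hp
  | cons q t =>
    rw [String.toList_append, String.toList_append, PySem.Str.toList_join, PySem.Str.toList_join]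
    rw [List.map_cons, List.map_cons, List.map_cons, PySem.Chars.join_cons_cons]

theorem pv_join_singleton (w : String) : PySem.Str.join " " [w] = w := by
  apply String.toList_inj.mp
  rw [PySem.Str.toList_join]
  simp [PySem.Chars.join_singleton]

theorem pvA_unfold1 (s : String) (W : List String)
    (hW : (PySem.Str.split? s " ").getD [] = W) (h1 : W.length = 1) :
    permutationSentence s = W := by
  subst hW
  rw [permutationSentence]
  exact dif_pos h1

theorem pvA_unfold (s : String) (W : List String)
    (hW : (PySem.Str.split? s " ").getD [] = W) (h1 : W.length ≠ 1) :
    permutationSentence s = (List.range W.length).flatMap (fun k =>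
      (permutationSentence (PySem.Str.join " " (W.eraseIdx k))).map
        (fun x => W.getD k "" ++ " " ++ x)) := by
  subst hW
  rw [permutationSentence]
  rw [dif_neg h1]
  rw [List.foldl_attach (f := fun (res : List String) (i : Int) =>
    res ++ (permutationSentence (PySem.Str.join " "
        (PySem.List.slice ((PySem.Str.split? s " ").getD []) (some 0) (some i) ++
         PySem.List.slice ((PySem.Str.split? s " ").getD []) (some (i + 1)) none))).map
      (fun x => PySem.List.pyGetD ((PySem.Str.split? s " ").getD []) i "" ++ " " ++ x))]
  rw [PySem.List.pyRange_zero_natCast, List.foldl_map,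
    PySem.List.foldl_append_eq_flatMap
      (g := fun (k : Nat) =>
        (permutationSentence (PySem.Str.join " "
            (PySem.List.slice ((PySem.Str.split? s " ").getD []) (some 0) (some ((k : Int))) ++
             PySem.List.slice ((PySem.Str.split? s " ").getD []) (some ((k : Int) + 1)) none))).map
          (fun x => PySem.List.pyGetD ((PySem.Str.split? s " ").getD []) ((k : Int)) "" ++ " " ++ x))]
  rw [List.nil_append]
  apply List.flatMap_congr
  intro k _
  rw [PySem.List.pyGetD_natCast, pvSlice_eraseIdx _ _ (by positivity)]
  congr 2

theorem pvA_eq : ∀ (n : Nat) (l : List String), l.length = n →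
    (∀ w ∈ l, ' ' ∉ w.toList) → l ≠ [] →
    permutationSentence (PySem.Str.join " " l) = (pvPermsAux n l).map (PySem.Str.join " ") := by
  intro n
  induction n with
  | zero => intro l hl _ hne; exact absurd (List.length_eq_zero_iff.mp hl) hne
  | succ m ih =>
    intro l hl hsp hne
    have hW : pvSplit (PySem.Str.join " " l) = l := by
      unfold pvSplit; rw [pvSplit_join l hsp hne]; rfl
    by_cases h1 : l.length = 1
    · rw [pvA_unfold1 _ l (by unfold pvSplit at hW; exact hW) h1]
      obtain ⟨w, rfl⟩ := List.length_eq_one_iff.mp h1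
      have hm : m = 0 := by omega
      subst hm
      have hperm : pvPermsAux 1 [w] = [[w]] := by simp [pvPermsAux]
      rw [hperm]
      simp only [List.map_cons, List.map_nil]
      rw [pv_join_singleton]
    · rw [pvA_unfold _ l (by unfold pvSplit at hW; exact hW) h1]
      have hm1 : 1 ≤ m := by omega
      rw [show pvPermsAux (m + 1) l = (List.range l.length).flatMap
          (fun i => (pvPermsAux m (l.eraseIdx i)).map (fun p => l.getD i "" :: p)) from rfl]
      rw [List.map_flatMap]
      apply List.flatMap_congr
      intro k hk
      rw [List.mem_range] at hk
      have he : (l.eraseIdx k).length = m := by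
        rw [List.length_eraseIdx, if_pos hk]; omega
      have hesp : ∀ w ∈ l.eraseIdx k, ' ' ∉ w.toList :=
        fun w hw => hsp w (List.mem_of_mem_eraseIdx hw)
      have hene : l.eraseIdx k ≠ [] := by
        intro hnil; rw [hnil] at he; simp at he; omega
      rw [ih (l.eraseIdx k) he hesp hene]
      rw [List.map_map, List.map_map]
      apply List.map_congr_left
      intro p hp
      have hplen : p.length = m := pv_perms_length m (l.eraseIdx k) he p hp
      have hpne : p ≠ [] := by intro hnil; rw [hnil] at hplen; simp at hplen; omega
      show l.getD k "" ++ " " ++ PySem.Str.join " " p = PySem.Str.join " " (l.getD k "" :: p)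
      exact pv_join_cons _ p hpne

theorem pv_join_split (s : String) : PySem.Str.join " " (pvSplit s) = s := by
  apply String.toList_inj.mp
  rw [PySem.Str.toList_join, pvSplit_eq]
  have h2 : List.map String.toList (List.map String.ofList (List.splitOn ' ' s.toList))
      = List.splitOn ' ' s.toList := by
    simp [Function.comp_def]
  rw [List.map_map] at h2 ⊢
  rw [h2]
  exact List.intercalate_splitOn s.toList ' '

theorem pv_final (s : String) : permutationSentence s = permutationSentence_alt s := by
  rw [pvB_eq]
  conv_lhs => rw [← pv_join_split s]
  rw [pvA_eq (pvSplit s).length (pvSplit s) rfl (pvSplit_words s) (pvSplit_ne_nil s)]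
  rfl

-- ===== VERDICT (by name: the statement is the Claim_ definition above) =====
theorem permutationSentence_spec : Claim_equal_permutationSentence := by
  intro s _
  unfold Spec_permutationSentence
  exact pv_final s
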